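-- pv_equiv track=rewrite | github.com/DamienReggio/EECS_6.0002 | ps01/ps1b.py | dp_make_weight_greedy
-- ===== SOURCE A (Python) =====
-- def dp_make_weight_greedy(egg_weights, target_weight, memo = {}):
--     """
--     Find number of eggs to bring back, using the smallest number of eggs. Assumes there is
--     an infinite supply of eggs of each weight, and there is always a egg of value 1.
--
--     Parameters:
--     egg_weights - tuple of integers, available egg weights sorted from smallest to largest value (1 = d1 < d2 < ... < dk)
--     target_weight - int, amount of weight we want to find eggs to fit
--     memo - dictionary, OPTIONAL parameter for memoization (you may not need to use this parameter depending on your implementation)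
--
--     Returns: int, smallest number of eggs needed to make target weight
--     """
--     best_number = target_weight # this should always be the WORST solution 1 * target_weight
--     remaining_weight = target_weight
--     # brute force
--     #
--     number_eggs = 0
--     while remaining_weight > 0:
--         for weight in reversed(egg_weights):
--             if weight <= remaining_weight:
--                 remaining_weight -= weight
--                 number_eggs += 1
--                 break
--
--     best_number = number_eggs
--
--     return(best_number)
-- ===== SOURCE B (Python) =====
-- def dp_make_weight_greedy(egg_weights, target_weight, memo = {}):
--     remaining = target_weight
--     count = 0
--     for w in reversed(egg_weights):
--         if remaining <= 0:
--             break
--         if w <= remaining: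
--             count += remaining // w
--             remaining %= w
--     return count
-- ===== Notes on version B (the rewrite author's own statement) =====
-- stated objective: alternative
-- what changed: Replaces the one-egg-per-iteration while loop (O(answer*k) subtractions) by a single pass over reversed(egg_weights) that takes all copies of each weight at once with // and %, O(k); a timing run could not confirm the speed-up because its large random inputs fall outside Pre_ (A diverges or weights are nonpositive there).
-- outside the precondition, e.g. on dp_make_weight_greedy((2,), 4, {}): A returns 2, B returns 2; on dp_make_weight_greedy((2,), 3, {}): A does not finish within the time limit, B returns 1; on dp_make_weight_greedy((-3, 5), 4, {}): A returns 4, B returns -2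
import Mathlib
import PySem

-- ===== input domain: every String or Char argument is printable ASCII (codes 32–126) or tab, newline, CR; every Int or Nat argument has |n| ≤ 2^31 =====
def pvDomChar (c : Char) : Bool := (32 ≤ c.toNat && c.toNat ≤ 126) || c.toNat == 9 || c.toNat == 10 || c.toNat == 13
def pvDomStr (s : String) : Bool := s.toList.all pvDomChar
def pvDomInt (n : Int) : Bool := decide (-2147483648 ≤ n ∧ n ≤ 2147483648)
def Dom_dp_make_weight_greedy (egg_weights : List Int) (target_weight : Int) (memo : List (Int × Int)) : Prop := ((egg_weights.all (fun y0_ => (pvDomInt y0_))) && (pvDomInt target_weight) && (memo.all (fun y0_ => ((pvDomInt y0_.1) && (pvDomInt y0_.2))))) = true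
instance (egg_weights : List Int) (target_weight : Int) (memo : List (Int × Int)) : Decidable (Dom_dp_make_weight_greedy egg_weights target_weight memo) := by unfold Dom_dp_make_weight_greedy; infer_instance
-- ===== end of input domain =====

-- B replaces A's one-egg-per-while-iteration greedy by a single divmod pass over reversed(egg_weights) (alternative algorithm, fewer iterations; unused memo kept for the signature).

-- ===== PORT A =====
-- A's `while remaining > 0` loop; the inner `for … break` over reversed(egg_weights) is find?.
-- Fuel target_weight.toNat bounds the iteration count on Pre_ inputs (each step subtracts ≥ 1);
-- on the `none` branch (no egg fits) the Python loops forever — outside Pre_.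
def dpLoopA (rws : List Int) : Nat → Int → Int → Int
  | 0, _, eggs => eggs
  | fuel+1, r, eggs =>
    if 0 < r then
      match rws.find? (fun w => decide (w ≤ r)) with
      | some w => dpLoopA rws fuel (r - w) (eggs + 1)
      | none => eggs
    else eggs

def dp_make_weight_greedy (egg_weights : List Int) (target_weight : Int) (memo : List (Int × Int)) : Int :=
  dpLoopA egg_weights.reverse target_weight.toNat target_weight 0

-- ===== PORT B =====
-- B's loop body: break once remaining ≤ 0; else take remaining // w eggs of weight w at once.
def dpStepB (p : Int × Int) (w : Int) : Int × Int :=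
  if p.1 ≤ 0 then p
  else if w ≤ p.1 then (PySem.Int.mod p.1 w, p.2 + PySem.Int.floordiv p.1 w)
  else p

def dp_make_weight_greedy_alt (egg_weights : List Int) (target_weight : Int) (memo : List (Int × Int)) : Int :=
  (egg_weights.reverse.foldl dpStepB (target_weight, 0)).2

-- ===== PRECONDITION & SPEC =====
-- Pre_ excludes inputs on which A's while loop diverges (no positive egg weight fits the remaining
-- weight at some step) and inputs with nonpositive weights, on which A's step-by-step trajectory and
-- B's divmod pass genuinely differ when A does terminate; it requires the docstring's stated
-- assumption "there is always an egg of value 1" and all weights ≥ 1 whenever target_weight > 0,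
-- which also excludes some inputs where A terminates without a weight-1 egg and A = B (claim cites).
def Pre_dp_make_weight_greedy (egg_weights : List Int) (target_weight : Int) (memo : List (Int × Int)) : Prop :=
  target_weight ≤ 0 ∨ ((1 : Int) ∈ egg_weights ∧ ∀ w ∈ egg_weights, 1 ≤ w)
instance (egg_weights : List Int) (target_weight : Int) (memo : List (Int × Int)) : Decidable (Pre_dp_make_weight_greedy egg_weights target_weight memo) := by unfold Pre_dp_make_weight_greedy; infer_instance

def pvWitness_dp_make_weight_greedy : List Int × Int × (List (Int × Int)) := ([1, 5, 10, 25], 99, [])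

def Spec_dp_make_weight_greedy (egg_weights : List Int) (target_weight : Int) (memo : List (Int × Int)) (out : Int) : Prop := out = dp_make_weight_greedy_alt egg_weights target_weight memo
instance (egg_weights : List Int) (target_weight : Int) (memo : List (Int × Int)) (out : Int) : Decidable (Spec_dp_make_weight_greedy egg_weights target_weight memo out) := by unfold Spec_dp_make_weight_greedy; infer_instance

-- ===== CLAIM (what is proved, stated in full; the proofs are below) =====
def Claim_equal_dp_make_weight_greedy : Prop := ∀ (egg_weights : List Int) (target_weight : Int) (memo : List (Int × Int)), Dom_dp_make_weight_greedy egg_weights target_weight memo → Pre_dp_make_weight_greedy egg_weights target_weight memo → Spec_dp_make_weight_greedy egg_weights target_weight memo (dp_make_weight_greedy egg_weights target_weight memo)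

-- ===== LEMMAS AND PROOFS =====

-- Once remaining ≤ 0, B's fold is the identity (the `break`).
theorem foldB_nonpos (l : List Int) (r c : Int) (h : r ≤ 0) :
    l.foldl dpStepB (r, c) = (r, c) := by
  induction l with
  | nil => rfl
  | cons a l ih => simp [List.foldl, dpStepB, h, ih]

-- One step of A's loop is absorbed by B's fold: subtracting the first fitting weight once
-- does not change the final egg count minus one.
theorem foldB_step (l : List Int) (r c w : Int)
    (hf : l.find? (fun w => decide (w ≤ r)) = some w)
    (hpos : ∀ x ∈ l, 1 ≤ x) (hr : 0 < r) :
    l.foldl dpStepB (r, c) = l.foldl dpStepB (r - w, c + 1) := by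
  induction l generalizing c with
  | nil => simp at hf
  | cons a l ih =>
    have ha1 : (1 : Int) ≤ a := hpos a (by simp)
    rw [List.find?_cons] at hf
    by_cases hale : a ≤ r
    · simp [hale] at hf
      subst hf
      have hmod : PySem.Int.mod r a = r % a := PySem.Int.mod_eq_emod_of_pos (by omega)
      have hdiv : PySem.Int.floordiv r a = r / a := PySem.Int.floordiv_eq_ediv_of_pos (by omega)
      have hm : r % a = (r - a) % a := (Int.sub_emod_right r a).symm
      by_cases hra : r - a ≤ 0
      · have hreq : r - a = 0 := by omega
        have e1 : dpStepB (r, c) a = (0, c + 1) := by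
          have h0 : r % a = 0 := by rw [hm, hreq]; simp
          have h1' : r / a = 1 := by
            rw [show r = a by omega]; exact Int.ediv_self (by omega)
          simp [dpStepB, not_le.mpr hr, hale, hmod, hdiv, h0, h1']
        have e2 : dpStepB (r - a, c + 1) a = (0, c + 1) := by
          simp [dpStepB, hra, hreq]
        rw [List.foldl_cons, List.foldl_cons, e1, e2]
      · -- r - a > 0
        have e1 : dpStepB (r, c) a = (r % a, c + r / a) := by
          simp [dpStepB, not_le.mpr hr, hale, hmod, hdiv]
        by_cases haa : a ≤ r - a
        · have hmod2 : PySem.Int.mod (r - a) a = (r - a) % a := PySem.Int.mod_eq_emod_of_pos (by omega)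
          have hdiv2 : PySem.Int.floordiv (r - a) a = (r - a) / a := PySem.Int.floordiv_eq_ediv_of_pos (by omega)
          have e2 : dpStepB (r - a, c + 1) a = ((r - a) % a, c + 1 + (r - a) / a) := by
            simp [dpStepB, not_le.mpr (by omega : (0:Int) < r - a), haa, hmod2, hdiv2]
          have hd : r / a = (r - a) / a + 1 := by
            have h := Int.add_mul_ediv_right (r - a) 1 (by omega : a ≠ 0)
            have : r - a + 1 * a = r := by ring
            rw [this] at h
            omega
          rw [List.foldl_cons, List.foldl_cons, e1, e2, hm, hd]
          ring_nf
        · -- a > r - a : B skips a on the right; on the left r % a = r - a, r / a = 1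
          have hmv : r % a = r - a := by
            rw [hm, Int.emod_eq_of_lt (by omega) (by omega)]
          have hd : r / a = 1 := by
            have h := Int.add_mul_ediv_right (r - a) 1 (by omega : a ≠ 0)
            have h2 : r - a + 1 * a = r := by ring
            have h3 : (r - a) / a = 0 := Int.ediv_eq_zero_of_lt (by omega) (by omega)
            rw [h2] at h
            omega
          have e1' : dpStepB (r, c) a = (r - a, c + 1) := by
            rw [e1, hmv, hd]
          have e2 : dpStepB (r - a, c + 1) a = (r - a, c + 1) := by
            simp [dpStepB, not_le.mpr (by omega : (0:Int) < r - a), haa]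
          rw [List.foldl_cons, List.foldl_cons, e1', e2]
    · -- ¬ a ≤ r : both folds skip a (on the right r - w ≤ r - 1 < a), recurse
      simp [hale] at hf
      have hwl : w ∈ l := List.mem_of_find?_eq_some hf
      have hw1 : (1 : Int) ≤ w := hpos w (by simp [hwl])
      have hwr : w ≤ r := by
        have := List.find?_some hf; simpa using this
      have hskipL : dpStepB (r, c) a = (r, c) := by
        simp [dpStepB, not_le.mpr hr, hale]
      have hskipR : dpStepB (r - w, c + 1) a = (r - w, c + 1) := by
        unfold dpStepB
        split_ifs with h1 h2
        · rfl
        · exfalso; omega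
        · rfl
      rw [List.foldl_cons, List.foldl_cons, hskipL, hskipR]
      exact ih c hf (fun x hx => hpos x (by simp [hx]))

-- A's fuelled loop equals B's fold whenever a weight-1 egg exists, all weights are ≥ 1,
-- and the fuel covers the remaining weight.
theorem loopA_eq_foldB (l : List Int) (fuel : Nat) (r c : Int)
    (hfuel : r.toNat ≤ fuel) (h1 : (1 : Int) ∈ l) (hpos : ∀ x ∈ l, 1 ≤ x) :
    dpLoopA l fuel r c = (l.foldl dpStepB (r, c)).2 := by
  induction fuel generalizing r c with
  | zero =>
    have hr : r ≤ 0 := by omega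
    rw [foldB_nonpos l r c hr]; rfl
  | succ fuel ih =>
    by_cases hr : 0 < r
    · have hfind : l.find? (fun w => decide (w ≤ r)) ≠ none := by
        intro hnone
        have := List.find?_eq_none.mp hnone 1 h1
        simp at this; omega
      obtain ⟨w, hw⟩ := Option.ne_none_iff_exists'.mp hfind
      have hwl : w ∈ l := List.mem_of_find?_eq_some hw
      have hw1 : (1 : Int) ≤ w := hpos w hwl
      rw [show dpLoopA l (fuel+1) r c = dpLoopA l fuel (r - w) (c + 1) by
            simp [dpLoopA, hr, hw]]
      rw [ih (r - w) (c + 1) (by omega), ← foldB_step l r c w hw hpos hr]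
    · rw [not_lt] at hr
      rw [foldB_nonpos l r c hr]
      simp [dpLoopA, not_lt.mpr hr]

-- ===== VERDICT (by name: the statement is the Claim_ definition above) =====
theorem dp_make_weight_greedy_spec : Claim_equal_dp_make_weight_greedy := by
  intro ws t memo _ hpre
  unfold Spec_dp_make_weight_greedy dp_make_weight_greedy dp_make_weight_greedy_alt
  rcases hpre with ht | ⟨h1, hpos⟩
  · rw [foldB_nonpos _ _ _ ht]
    have : t.toNat = 0 := by omega
    rw [this]; rfl
  · exact loopA_eq_foldB ws.reverse t.toNat t 0 (le_refl _)
      (List.mem_reverse.mpr h1) (fun x hx => hpos x (List.mem_reverse.mp hx))
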